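-- pv_equiv track=rewrite | github.com/litakgit/DSAlgo | Random/smallest_palindrome_formation_by_appending_only.py | get_smallest_palin_by_appending_only
-- ===== SOURCE A (Python) =====
-- def get_smallest_palin_by_appending_only(s):
--     l = len(s) - 1
--     pos = 0
--     while True:
--         end = l - pos
--         start = 0
--         while start < end:
--             if s[start] == s[end]:
--                 start, end = start + 1, end - 1
--             else:
--                 break
--         if start >= end:
--             break
--         pos += 1
--     return ''.join(list(reversed(s[-pos:]))) if pos else ''
-- ===== SOURCE B (Python) =====
-- def get_smallest_palin_by_appending_only(s):
--     # Single ascending Rabin-Karp pass: rolling hashes (base 131 mod 2**61-1) of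
--     # the growing prefix and of its reverse filter palindrome candidates; an
--     # exact slice comparison confirms a hit; keep the longest confirmed prefix.
--     M = 2305843009213693951
--     fh = 0
--     rh = 0
--     p = 1
--     best = 0
--     m = 0
--     for ch in s:
--         d = ord(ch)
--         fh = (fh + d * p) % M
--         rh = (rh * 131 + d) % M
--         p = (p * 131) % M
--         m = m + 1
--         if fh == rh and s[:m] == s[:m][::-1]:
--             best = m
--     return s[best:][::-1]
-- ===== Notes on version B (the rewrite author's own statement) =====
-- stated objective: alternative
-- what changed: Replaces A's nested loops (retry a two-pointer palindrome scan on a prefix shrinking from the right) by a single ascending Rabin-Karp pass that maintains rolling hashes (base 131 mod 2^61-1) of the growing prefix and of its reverse, confirms hash hits with an exact slice comparison, and keeps the longest confirmed palindromic prefix.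
import Mathlib
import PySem

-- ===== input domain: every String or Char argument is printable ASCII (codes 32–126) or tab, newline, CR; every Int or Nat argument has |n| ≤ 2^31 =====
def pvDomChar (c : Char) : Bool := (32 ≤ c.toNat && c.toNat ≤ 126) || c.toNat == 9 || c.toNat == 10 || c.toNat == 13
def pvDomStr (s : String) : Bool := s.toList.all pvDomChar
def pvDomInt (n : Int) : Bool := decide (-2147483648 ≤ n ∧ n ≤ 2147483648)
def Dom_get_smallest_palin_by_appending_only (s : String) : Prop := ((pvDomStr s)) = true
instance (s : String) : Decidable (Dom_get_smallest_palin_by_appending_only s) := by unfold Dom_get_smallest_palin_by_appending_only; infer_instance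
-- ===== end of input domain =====

-- B replaces A's nested retry loops by one ascending Rabin-Karp pass: rolling
-- hashes (base 131 mod 2^61-1) of the prefix and its reverse filter palindrome
-- candidates, an exact slice comparison confirms; return-value equivalence only.

-- ===== PORT A =====
-- inner `while start < end` loop of A; returns the final (start, end)
def pvInnerA (l : List Char) (start e : Int) : Int × Int :=
  if _h : start < e then
    if PySem.List.pyGet? l start = PySem.List.pyGet? l e then
      pvInnerA l (start + 1) (e - 1)
    else (start, e)
  else (start, e)
termination_by (e - start).toNat
decreasing_by omega

-- outer `while True` loop of A over pos; fuel bounds the iterations (length+1 always suffices)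
def pvOuterA (l : List Char) (L : Int) : Nat → Int → Int
  | 0, pos => pos
  | f + 1, pos =>
    let r := pvInnerA l 0 (L - pos)
    if r.2 ≤ r.1 then pos else pvOuterA l L f (pos + 1)

def get_smallest_palin_by_appending_only (s : String) : String :=
  let l := s.toList
  let pos := pvOuterA l ((l.length : Int) - 1) (l.length + 1) 0
  if pos = 0 then ""
  else String.ofList (PySem.List.slice l (some (-pos)) none).reverse

-- ===== PORT B =====
def pvM : Int := 2305843009213693951

-- `for ch in s`: fh = (fh+d*p)%M; rh = (rh*131+d)%M; p = (p*131)%M; m += 1;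
-- `if fh == rh and s[:m] == s[:m][::-1]: best = m`
-- (the slices s[:m] with 0 ≤ m ≤ len(s) and [::-1] are ported as take/reverse: exact there)
def pvScanB (l t : List Char) (fh rh p : Int) (m best : Nat) : Nat :=
  match t with
  | [] => best
  | c :: t' =>
    let d : Int := c.toNat
    let fh' := PySem.Int.mod (fh + d * p) pvM
    let rh' := PySem.Int.mod (rh * 131 + d) pvM
    let p' := PySem.Int.mod (p * 131) pvM
    let m' := m + 1
    let best' := if fh' = rh' ∧ l.take m' = (l.take m').reverse then m' else best
    pvScanB l t' fh' rh' p' m' best'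

def get_smallest_palin_by_appending_only_alt (s : String) : String :=
  String.ofList ((s.toList.drop (pvScanB s.toList s.toList 0 0 1 0 0)).reverse)

-- ===== PRECONDITION & SPEC =====
def Spec_get_smallest_palin_by_appending_only (s : String) (out : String) : Prop := out = get_smallest_palin_by_appending_only_alt s
instance (s : String) (out : String) : Decidable (Spec_get_smallest_palin_by_appending_only s out) := by unfold Spec_get_smallest_palin_by_appending_only; infer_instance

-- ===== CLAIM (what is proved, stated in full; the proofs are below) =====
def Claim_equal_get_smallest_palin_by_appending_only : Prop := ∀ (s : String), Dom_get_smallest_palin_by_appending_only s → Spec_get_smallest_palin_by_appending_only s (get_smallest_palin_by_appending_only s)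

-- ===== LEMMAS AND PROOFS =====

-- proof-side reference algorithm: descending scan over prefix lengths
def pvAltLoop (l : List Char) : Nat → List Char
  | 0 => []
  | m + 1 =>
    let p := l.take (m + 1)
    if p = p.reverse then (l.drop (m + 1)).reverse else pvAltLoop l m

-- greatest palindromic-prefix length ≤ k (0 if none)
def pvG (l : List Char) : Nat → Nat
  | 0 => 0
  | k + 1 => if l.take (k + 1) = (l.take (k + 1)).reverse then k + 1 else pvG l k

-- little-endian base-131 value of a char list
def pvVal : List Char → Int
  | [] => 0
  | c :: t => (c.toNat : Int) + 131 * pvVal t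

-- a list of the shape x :: m ++ [y] is a palindrome iff x = y and m is one
lemma pal_cons_append_singleton (x y : Char) (m : List Char) :
    (x :: (m ++ [y])) = (x :: (m ++ [y])).reverse ↔ x = y ∧ m = m.reverse := by
  rw [List.reverse_cons, List.reverse_append, List.reverse_singleton, List.singleton_append,
    List.cons_append, List.cons.injEq]
  constructor
  · rintro ⟨rfl, h⟩
    exact ⟨rfl, (List.append_left_inj [x]).mp h⟩
  · rintro ⟨rfl, h⟩
    exact ⟨rfl, by rw [← h]⟩

-- a list of length ≤ 1 is a palindrome
lemma short_pal (xs : List Char) (h : xs.length ≤ 1) : xs = xs.reverse := by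
  match xs with
  | [] => rfl
  | [a] => rfl
  | a :: b :: t => simp at h

-- the segment l[s..e] splits off its end points when s < e
lemma seg_decomp (l : List Char) (s e : Int) (hs : 0 ≤ s) (hse : s < e)
    (he : e < l.length) :
    (l.drop s.toNat).take (e - s + 1).toNat =
      l[s.toNat]'(by omega) ::
        (((l.drop (s + 1).toNat).take ((e - 1) - (s + 1) + 1).toNat) ++ [l[e.toNat]'(by omega)]) := by
  have hsn : s.toNat < l.length := by omega
  have hen : e.toNat < l.length := by omega
  have h1 : (s + 1).toNat = s.toNat + 1 := by omega
  have h2 : (e - s + 1).toNat = ((e - 1) - (s + 1) + 1).toNat + 2 := by omega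
  rw [h1, h2, List.drop_eq_getElem_cons hsn, List.take_succ_cons]
  congr 1
  set k := ((e - 1) - (s + 1) + 1).toNat with hk
  have h3 : k + 1 = (e.toNat - (s.toNat + 1)) + 1 := by omega
  rw [h3, List.take_add_one, List.getElem?_drop,
    show s.toNat + 1 + (e.toNat - (s.toNat + 1)) = e.toNat from by omega,
    List.getElem?_eq_getElem hen]
  simp only [Option.toList_some]
  rw [show e.toNat - (s.toNat + 1) = k from by omega]

-- the inner two-pointer loop exits with start ≥ end iff the segment l[s..e] is a palindrome
lemma inner_spec (l : List Char) : ∀ (n : Nat) (s e : Int), (e + 1 - s).toNat = n →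
    0 ≤ s → e < l.length →
    (((pvInnerA l s e).2 ≤ (pvInnerA l s e).1) ↔
      (l.drop s.toNat).take (e - s + 1).toNat = ((l.drop s.toNat).take (e - s + 1).toNat).reverse) := by
  intro n
  induction n using Nat.strong_induction_on with
  | _ n ih =>
    intro s e hn hs he
    by_cases hse : s < e
    · have hsn : s.toNat < l.length := by omega
      have hen : e.toNat < l.length := by omega
      have hgs : PySem.List.pyGet? l s = some (l[s.toNat]'hsn) :=
        PySem.List.pyGet?_eq_some_getElem l hs (by exact_mod_cast by omega)
      have hge : PySem.List.pyGet? l e = some (l[e.toNat]'hen) :=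
        PySem.List.pyGet?_eq_some_getElem l (by omega) (by exact_mod_cast he)
      rw [pvInnerA, dif_pos hse, hgs, hge]
      rw [seg_decomp l s e hs hse he, pal_cons_append_singleton]
      by_cases hc : l[s.toNat]'hsn = l[e.toNat]'hen
      · rw [if_pos (by rw [hc]),
          ih ((e - 1) + 1 - (s + 1)).toNat (by omega) (s + 1) (e - 1) rfl (by omega) (by omega)]
        simp [hc]
      · rw [if_neg (by simpa using hc)]
        constructor
        · intro h
          have h' : e ≤ s := h
          omega
        · rintro ⟨h, -⟩
          exact absurd h hc
    · rw [pvInnerA, dif_neg hse]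
      constructor
      · intro _
        exact short_pal _ (by simp only [List.length_take, List.length_drop]; omega)
      · intro _
        show e ≤ s
        omega

-- a nonempty prefix of length 1 is always a palindrome
lemma pal_take_one (l : List Char) (hl : l ≠ []) : l.take 1 = (l.take 1).reverse := by
  cases l with
  | nil => simp at hl
  | cons a t => simp

-- correspondence of A's outer loop (from pos = n - m) with the descending scan (from m)
lemma corr (l : List Char) : ∀ (m : Nat) (f : Nat), 1 ≤ m → m ≤ l.length → m ≤ f →
    (let p := pvOuterA l ((l.length : Int) - 1) f (((l.length - m : Nat) : Int));
      if p = 0 then ([] : List Char)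
      else (PySem.List.slice l (some (-p)) none).reverse) = pvAltLoop l m := by
  intro m
  induction m with
  | zero => intro f h1; omega
  | succ m ihm =>
    intro f _ hm hf
    obtain ⟨g, rfl⟩ : ∃ g, f = g + 1 := ⟨f - 1, by omega⟩
    have hpal := inner_spec l (m + 1) 0 (((m : Int) + 1) - 1) (by omega) (by omega)
      (by exact_mod_cast by omega)
    simp only [Int.toNat_zero, List.drop_zero,
      show ((m : Int) + 1) - 1 - 0 + 1 = ((m + 1 : Nat) : Int) by push_cast; ring,
      Int.toNat_natCast] at hpal
    have harg : (l.length : Int) - 1 - ((l.length - (m + 1) : Nat) : Int) = ((m : Int) + 1) - 1 := by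
      omega
    rw [pvOuterA]
    simp only [harg]
    by_cases hc : l.take (m + 1) = (l.take (m + 1)).reverse
    · rw [if_pos (hpal.mpr hc)]
      have hstep : pvAltLoop l (m + 1) = (l.drop (m + 1)).reverse := by
        rw [pvAltLoop]; exact if_pos hc
      rw [hstep]
      by_cases hz : l.length - (m + 1) = 0
      · rw [if_pos (by exact_mod_cast hz)]
        rw [List.drop_eq_nil_of_le (by omega)]
        rfl
      · rw [if_neg (by exact_mod_cast hz)]
        rw [PySem.List.slice_from_neg_natCast l (l.length - (m + 1)) (by omega)]
        rw [show l.length - (l.length - (m + 1)) = m + 1 from by omega]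
    · have hcond : ¬ ((pvInnerA l 0 ((m : Int) + 1 - 1)).2 ≤ (pvInnerA l 0 ((m : Int) + 1 - 1)).1) :=
        fun h => hc (hpal.mp h)
      rw [if_neg hcond]
      have hstep : pvAltLoop l (m + 1) = pvAltLoop l m := by
        rw [pvAltLoop]; exact if_neg hc
      rw [hstep]
      rcases Nat.lt_or_ge m 1 with hm1 | hm1
      · interval_cases m
        exact absurd (pal_take_one l (by intro h; rw [h] at hm; simp at hm)) hc
      · rw [show ((l.length - (m + 1) : Nat) : Int) + 1 = ((l.length - m : Nat) : Int) from by omega]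
        exact ihm g hm1 (by omega) (by omega)

-- A's result equals the descending-scan reference
lemma A_eq_altLoop (s : String) :
    get_smallest_palin_by_appending_only s = String.ofList (pvAltLoop s.toList s.toList.length) := by
  unfold get_smallest_palin_by_appending_only
  show (if pvOuterA s.toList ((s.toList.length : Int) - 1) (s.toList.length + 1) 0 = 0 then ""
      else String.ofList (PySem.List.slice s.toList
        (some (-(pvOuterA s.toList ((s.toList.length : Int) - 1) (s.toList.length + 1) 0))) none).reverse)
    = String.ofList (pvAltLoop s.toList s.toList.length)
  generalize s.toList = l
  rcases Nat.eq_zero_or_pos l.length with h0 | hpos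
  · obtain rfl := List.length_eq_zero_iff.mp h0
    rw [pvOuterA]
    simp [pvInnerA, pvAltLoop]
  · have h := corr l l.length (l.length + 1) hpos le_rfl (by omega)
    simp only [Nat.sub_self, Nat.cast_zero] at h
    rw [← h]
    by_cases hP : pvOuterA l ((l.length : Int) - 1) (l.length + 1) 0 = 0
    · simp only [if_pos hP]
    · simp only [if_neg hP]

-- PySem.Int.mod by the positive modulus pvM is Int.emod
lemma pvmod_eq (a : Int) : PySem.Int.mod a pvM = a % pvM := by
  have h : (0 : Int) ≤ pvM := by norm_num [pvM]
  simp [PySem.Int.mod, Int.fmod_eq_emod, h]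

-- reducing an operand mod pvM does not change a sum/product mod pvM
lemma pvmod_absorb (x : Int) : x % pvM ≡ x [ZMOD pvM] :=
  Int.emod_emod_of_dvd x dvd_rfl

-- value of a snoc
lemma pvVal_append_singleton (q : List Char) (c : Char) :
    pvVal (q ++ [c]) = pvVal q + (c.toNat : Int) * 131 ^ q.length := by
  induction q with
  | nil => simp [pvVal]
  | cons a t ih =>
    simp only [List.cons_append, pvVal, ih, List.length_cons]
    ring

-- the scan's state invariant: starting from the hashes of prefix q, it ends at pvG l l.length
lemma scan_inv (l : List Char) :
    ∀ (t q : List Char), q ++ t = l →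
      pvScanB l t (pvVal q % pvM) (pvVal q.reverse % pvM) (131 ^ q.length % pvM)
        q.length (pvG l q.length) = pvG l l.length := by
  intro t
  induction t with
  | nil =>
    intro q hq
    rw [pvScanB]
    rw [show q = l from by simpa using hq]
  | cons c t' ih =>
    intro q hq
    rw [pvScanB]
    have hql : l.take (q.length + 1) = q ++ [c] := by
      rw [← hq]
      rw [show q.length + 1 = (q ++ [c]).length from by simp]
      rw [show q ++ c :: t' = (q ++ [c]) ++ t' from by simp]
      exact List.take_left
    have hfh : PySem.Int.mod (pvVal q % pvM + (c.toNat : Int) * (131 ^ q.length % pvM)) pvM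
        = pvVal (q ++ [c]) % pvM := by
      rw [pvmod_eq, pvVal_append_singleton]
      exact (pvmod_absorb (pvVal q)).add ((pvmod_absorb (131 ^ q.length)).mul_left _)
    have hrh : PySem.Int.mod (pvVal q.reverse % pvM * 131 + (c.toNat : Int)) pvM
        = pvVal ((q ++ [c]).reverse) % pvM := by
      rw [pvmod_eq,
        show pvVal ((q ++ [c]).reverse) = pvVal q.reverse * 131 + (c.toNat : Int) from by
          simp only [List.reverse_append, List.reverse_singleton, List.singleton_append, pvVal]
          ring]
      exact ((pvmod_absorb (pvVal q.reverse)).mul_right 131).add (Int.ModEq.refl _)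
    have hp : PySem.Int.mod (131 ^ q.length % pvM * 131) pvM = 131 ^ (q.length + 1) % pvM := by
      rw [pvmod_eq, pow_succ]
      exact (pvmod_absorb (131 ^ q.length)).mul_right 131
    have hbest : (if pvVal (q ++ [c]) % pvM = pvVal ((q ++ [c]).reverse) % pvM ∧
          l.take (q.length + 1) = (l.take (q.length + 1)).reverse then q.length + 1
        else pvG l q.length) = pvG l (q.length + 1) := by
      rw [pvG]
      by_cases h : l.take (q.length + 1) = (l.take (q.length + 1)).reverse
      · have hpal : q ++ [c] = (q ++ [c]).reverse := by rw [← hql]; exact h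
        rw [if_pos ⟨by rw [← hpal], h⟩, if_pos h]
      · rw [if_neg (fun hh => h hh.2), if_neg h]
    have hrec := ih (q ++ [c]) (by simpa using hq)
    simp only [List.length_append, List.length_cons, List.length_nil, Nat.zero_add] at hrec
    simp only [hfh, hrh, hp, hbest]
    exact hrec

-- the descending scan equals drop-at-pvG
lemma altLoop_eq_g (l : List Char) (hl : l ≠ []) :
    ∀ k, 1 ≤ k → pvAltLoop l k = (l.drop (pvG l k)).reverse := by
  intro k
  induction k with
  | zero => intro h; omega
  | succ k ihk =>
    intro _
    rw [pvAltLoop, pvG]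
    by_cases hc : l.take (k + 1) = (l.take (k + 1)).reverse
    · rw [if_pos hc, if_pos hc]
    · rw [if_neg hc, if_neg hc]
      rcases Nat.lt_or_ge k 1 with hk1 | hk1
      · interval_cases k
        exact absurd (pal_take_one l hl) hc
      · exact ihk hk1

-- ===== VERDICT (by name: the statement is the Claim_ definition above) =====
theorem get_smallest_palin_by_appending_only_spec : Claim_equal_get_smallest_palin_by_appending_only := by
  intro s _
  unfold Spec_get_smallest_palin_by_appending_only
  rw [A_eq_altLoop]
  unfold get_smallest_palin_by_appending_only_alt
  have hscan : pvScanB s.toList s.toList 0 0 1 0 0 = pvG s.toList s.toList.length := by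
    have h := scan_inv s.toList s.toList [] (by simp)
    simp only [pvVal, List.reverse_nil, List.length_nil, pow_zero, pvG] at h
    rw [Int.zero_emod, Int.emod_eq_of_lt (by norm_num) (by norm_num [pvM])] at h
    exact h
  rw [hscan]
  rcases eq_or_ne s.toList [] with h0 | h0
  · rw [h0]
    simp [pvAltLoop, pvG]
  · rw [altLoop_eq_g s.toList h0 s.toList.length (List.length_pos_iff.mpr h0)]
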